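-- pv_equiv track=rewrite | github.com/Hyunta/Algorithm | Baekjoon/~2022.01.10/21314.py | getLeast
-- ===== SOURCE A (Python) =====
-- def getLeast(word):
--     answer = ""
--     m = 0
--     for i in range(len(word)):
--         if word[i] == "M":
--             m += 1
--         elif word[i] == "K":
--             if m:
--                 answer += str(10 ** m + 5)
--             else:
--                 answer += "5"
--             m = 0
--     if m:
--         answer += str(10 ** (m - 1))
--     return answer
-- ===== SOURCE B (Python) =====
-- def getLeast(word):
--     runs = ''.join(c for c in word if c in 'MK').split('K')
--     parts = ['1' + '0' * (len(r) - 1) + '5' if r else '5' for r in runs[:-1]]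
--     last = runs[-1]
--     if last:
--         parts.append('1' + '0' * (len(last) - 1))
--     return ''.join(parts)
-- ===== Notes on version B (the rewrite author's own statement) =====
-- stated objective: faster
-- what changed: B filters the word to its M/K characters and splits on the K separators, emitting each run's decimal chunk directly as a one, m-1 zeros and a trailing five, instead of A's per-character counter loop that computes the big integer 10**m and converts it with str().
import Mathlib
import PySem

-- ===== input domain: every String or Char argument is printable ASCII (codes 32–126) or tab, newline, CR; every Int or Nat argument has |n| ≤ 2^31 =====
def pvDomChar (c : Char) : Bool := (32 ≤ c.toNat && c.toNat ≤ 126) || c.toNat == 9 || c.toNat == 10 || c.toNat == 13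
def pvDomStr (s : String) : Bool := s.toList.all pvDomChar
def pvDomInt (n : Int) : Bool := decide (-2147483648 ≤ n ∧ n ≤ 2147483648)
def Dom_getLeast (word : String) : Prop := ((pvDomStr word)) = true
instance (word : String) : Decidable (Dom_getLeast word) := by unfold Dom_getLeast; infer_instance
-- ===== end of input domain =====

-- B builds each decimal chunk directly as '1' + '0'*(m-1) (+ '5') from the K-separated runs of M's
-- instead of converting 10**m to a string; objective: faster (no big-integer power/str conversion).


-- ===== PORT A =====
-- A's for-loop over the characters, with its state (answer, m), as the obvious structural recursion;
-- str(10 ** m + 5) / str(10 ** (m - 1)) are PySem.Int.toChars of the corresponding Int powers (m ≥ 0 always).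
def getLeastGo : List Char → List Char → Nat → List Char
  | [], answer, m => if m ≠ 0 then answer ++ PySem.Int.toChars ((10 : Int) ^ (m - 1)) else answer
  | c :: rest, answer, m =>
    if c = 'M' then getLeastGo rest answer (m + 1)
    else if c = 'K' then
      if m ≠ 0 then getLeastGo rest (answer ++ PySem.Int.toChars ((10 : Int) ^ m + 5)) 0
      else getLeastGo rest (answer ++ ['5']) 0
    else getLeastGo rest answer m

def getLeast (word : String) : String := String.mk (getLeastGo word.toList [] 0)

-- ===== PORT B =====
-- Source B: filter the word to its M/K characters, split on 'K' (List.splitOn is exact for a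
-- one-character separator), render each run directly as a digit string, join.
def pieceB (r : List Char) : List Char :=
  if r = [] then ['5'] else '1' :: (List.replicate (r.length - 1) '0' ++ ['5'])

def tailPieceB (r : List Char) : List Char :=
  if r = [] then [] else '1' :: List.replicate (r.length - 1) '0'

def getLeast_alt (word : String) : String :=
  let runs := (word.toList.filter (fun c => c == 'M' || c == 'K')).splitOn 'K'
  String.mk ((runs.dropLast.map pieceB).flatten ++ tailPieceB (runs.getLastD []))

-- ===== PRECONDITION & SPEC =====
def Spec_getLeast (word : String) (out : String) : Prop := out = getLeast_alt word
instance (word : String) (out : String) : Decidable (Spec_getLeast word out) := by unfold Spec_getLeast; infer_instance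

-- ===== CLAIM (what is proved, stated in full; the proofs are below) =====
def Claim_equal_getLeast : Prop := ∀ (word : String), Dom_getLeast word → Spec_getLeast word (getLeast word)

-- ===== LEMMAS AND PROOFS =====

-- toDigitsCore only prepends to its accumulator
theorem toDigitsCore_acc (b : Nat) : ∀ (f n : Nat) (l : List Char),
    Nat.toDigitsCore b f n l = Nat.toDigitsCore b f n [] ++ l := by
  intro f
  induction f with
  | zero => intro n l; rfl
  | succ f ih =>
    intro n l
    simp only [Nat.toDigitsCore]
    by_cases h : n / b = 0
    · simp [h]
    · simp only [h]
      rw [ih (n / b) [Nat.digitChar (n % b)], ih (n / b) (Nat.digitChar (n % b) :: l)]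
      simp

-- decimal digits of 10^k, with enough fuel
theorem toDigitsCore_pow10 : ∀ (k f : Nat), k < f →
    Nat.toDigitsCore 10 f (10 ^ k) [] = '1' :: List.replicate k '0' := by
  intro k
  induction k with
  | zero =>
    intro f hf
    obtain ⟨f', rfl⟩ : ∃ f', f = f' + 1 := ⟨f - 1, by omega⟩
    rw [Nat.toDigitsCore]
    norm_num
    decide
  | succ k ih =>
    intro f hf
    obtain ⟨f', rfl⟩ : ∃ f', f = f' + 1 := ⟨f - 1, by omega⟩
    have hdiv : 10 ^ (k + 1) / 10 = 10 ^ k := by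
      rw [pow_succ]; exact Nat.mul_div_cancel _ (by norm_num)
    have hmod : 10 ^ (k + 1) % 10 = 0 := by
      rw [pow_succ]; exact Nat.mul_mod_left _ _
    have hne' : ¬ (10 ^ k = 0) := by positivity
    rw [Nat.toDigitsCore, hdiv, hmod, if_neg hne', toDigitsCore_acc, ih f' (by omega)]
    rw [show Nat.digitChar 0 = '0' from rfl, List.replicate_succ']
    simp

theorem toChars_pow10 (k : Nat) :
    PySem.Int.toChars ((10 : Int) ^ k) = '1' :: List.replicate k '0' := by
  have h0 : ¬ ((10 : Int) ^ k < 0) := not_lt.mpr (by positivity)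
  have ht : ((10 : Int) ^ k).toNat = 10 ^ k := by
    rw [show (10 : Int) ^ k = ((10 ^ k : Nat) : Int) by push_cast; ring]
    exact Int.toNat_natCast _
  simp only [PySem.Int.toChars, if_neg h0, ht, Nat.toDigits]
  exact toDigitsCore_pow10 k (10 ^ k + 1) (by
    have h := Nat.lt_pow_self (n := k) (a := 10) (by norm_num)
    omega)

theorem toChars_pow10_add5 (k : Nat) (hk : k ≠ 0) :
    PySem.Int.toChars ((10 : Int) ^ k + 5) = '1' :: (List.replicate (k - 1) '0' ++ ['5']) := by
  have h0 : ¬ ((10 : Int) ^ k + 5 < 0) := not_lt.mpr (by positivity)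
  have ht : ((10 : Int) ^ k + 5).toNat = 10 ^ k + 5 := by
    rw [show (10 : Int) ^ k + 5 = ((10 ^ k + 5 : Nat) : Int) by push_cast; ring]
    exact Int.toNat_natCast _
  simp only [PySem.Int.toChars, if_neg h0, ht, Nat.toDigits]
  obtain ⟨j, rfl⟩ : ∃ j, k = j + 1 := ⟨k - 1, by omega⟩
  set x := 10 ^ j with hx
  have hxpos : 0 < x := by positivity
  have hdiv : (10 ^ (j + 1) + 5) / 10 = x := by rw [pow_succ, ← hx]; omega
  have hmod : (10 ^ (j + 1) + 5) % 10 = 5 := by rw [pow_succ, ← hx]; omega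
  have hfuel : j < 10 ^ (j + 1) + 5 := by
    have h1 := Nat.lt_pow_self (n := j) (a := 10) (by norm_num)
    have h2 : 10 ^ j ≤ 10 ^ (j + 1) := Nat.pow_le_pow_right (by norm_num) (by omega)
    omega
  rw [Nat.toDigitsCore, hdiv, hmod, if_neg (by omega), toDigitsCore_acc, hx, toDigitsCore_pow10 j _ (by omega)]
  rw [show Nat.digitChar 5 = '5' from rfl]
  simp

-- B's rendering of a list of runs
def renderB (runs : List (List Char)) : List Char :=
  (runs.dropLast.map pieceB).flatten ++ tailPieceB (runs.getLastD [])

theorem renderB_cons (r : List Char) (runs : List (List Char)) (h : runs ≠ []) :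
    renderB (r :: runs) = pieceB r ++ renderB runs := by
  obtain ⟨r', rs, rfl⟩ : ∃ r' rs, runs = r' :: rs := by
    cases runs with
    | nil => exact absurd rfl h
    | cons a l => exact ⟨a, l, rfl⟩
  simp [renderB, List.dropLast_cons₂]

theorem no_K_in_replicate (m : Nat) : ∀ x ∈ List.replicate m 'M', ¬ ((x == 'K') = true) := by
  intro x hx
  rw [List.eq_of_mem_replicate hx]
  decide

-- main loop invariant: the A-loop from state (answer, m) produces answer ++ B's rendering of
-- the runs of (m pending M's ++ the M/K characters still to come)
theorem getLeastGo_eq : ∀ (l : List Char) (answer : List Char) (m : Nat),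
    getLeastGo l answer m =
      answer ++ renderB ((List.replicate m 'M' ++ l.filter (fun c => c == 'M' || c == 'K')).splitOn 'K') := by
  intro l
  induction l with
  | nil =>
    intro answer m
    simp only [List.filter_nil, List.append_nil, getLeastGo]
    rw [List.splitOn, List.splitOnP_eq_single _ _ (no_K_in_replicate m)]
    by_cases hm : m = 0
    · subst hm; simp [renderB, tailPieceB]
    · simp only [if_pos hm, renderB]
      simp only [List.dropLast_singleton, List.map_nil, List.flatten_nil, List.getLastD_cons,
        List.getLastD_nil, List.nil_append, tailPieceB]
      rw [if_neg (by simp [List.replicate_eq_nil_iff]; omega)]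
      rw [toChars_pow10 (m - 1)]
      simp
  | cons c rest ih =>
    intro answer m
    by_cases hM : c = 'M'
    · subst hM
      simp only [getLeastGo, List.filter_cons]
      norm_num
      rw [ih answer (m + 1)]
      congr 2
      rw [show List.replicate (m + 1) 'M' = List.replicate m 'M' ++ ['M'] from List.replicate_succ' ..]
      simp
    · by_cases hK : c = 'K'
      · subst hK
        simp only [getLeastGo, if_neg (by decide : ¬ ('K' = 'M')), List.filter_cons]
        norm_num
        rw [List.splitOn, List.splitOnP_first _ _ (no_K_in_replicate m) 'K' (by decide)]
        rw [renderB_cons _ _ (List.splitOnP_ne_nil _ _)]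
        by_cases hm : m = 0
        · subst hm
          rw [if_pos rfl, ih]
          simp [pieceB, List.splitOn]
        · rw [if_neg hm, ih]
          have : pieceB (List.replicate m 'M') = PySem.Int.toChars ((10 : Int) ^ m + 5) := by
            rw [toChars_pow10_add5 m hm, pieceB,
              if_neg (by simp [List.replicate_eq_nil_iff]; omega)]
            simp
          rw [this, List.splitOn]
          simp
      · simp only [getLeastGo, if_neg hM, if_neg hK, List.filter_cons]
        have : ((c == 'M') || (c == 'K')) = false := by
          simp [hM, hK]
        rw [this]
        simp only [Bool.false_eq_true, if_false]
        exact ih answer m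

-- ===== VERDICT (by name: the statement is the Claim_ definition above) =====
theorem getLeast_spec : Claim_equal_getLeast := by
  intro word _
  unfold Spec_getLeast getLeast getLeast_alt
  rw [getLeastGo_eq]
  simp [renderB]
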